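-- pv_equiv track=rewrite | github.com/evalenzup/proyecto-crm | backend/app/api/catalogos.py | _filtrar_catalogo
-- ===== SOURCE A (Python) =====
-- from typing import Optional, List
--
-- def _filtrar_catalogo(
--     data: list[dict], q: Optional[str], limit: Optional[int]
-- ) -> list[dict]:
--     """
--     Filtro simple por 'q' en clave/descripcion y recorte por 'limit'.
--     Cada elemento del catálogo debe tener llaves 'clave' y 'descripcion'.
--     """
--     items = data
--     if q:
--         s = q.strip().lower()
--         items = [
--             it
--             for it in items
--             if s in it.get("clave", "").lower()
--             or s in it.get("descripcion", "").lower()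
--         ]
--     if limit and limit > 0:
--         items = items[:limit]
--     return items
-- ===== SOURCE B (Python) =====
-- from typing import Optional, List
--
--
-- def _filtrar_catalogo(
--     data: list, q: Optional[str], limit: Optional[int]
-- ) -> list:
--     """Single early-terminating pass: fuse the substring filter and the
--     limit truncation, decrementing a remaining budget and breaking as soon
--     as it is exhausted."""
--     s = q.strip().lower() if q else None
--     remaining = limit if (limit and limit > 0) else None
--     out = []
--     for it in data:
--         if remaining is not None and remaining <= 0:
--             break
--         if (
--             s is None
--             or s in it.get("clave", "").lower()
--             or s in it.get("descripcion", "").lower()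
--         ):
--             out.append(it)
--             if remaining is not None:
--                 remaining -= 1
--     return out
-- ===== Notes on version B (the rewrite author's own statement) =====
-- stated objective: alternative
-- what changed: Replaces the filter-comprehension followed by a slice with one early-terminating loop that decrements a remaining budget and breaks once the limit is reached, fusing filtering and truncation into a single pass.
import Mathlib
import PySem

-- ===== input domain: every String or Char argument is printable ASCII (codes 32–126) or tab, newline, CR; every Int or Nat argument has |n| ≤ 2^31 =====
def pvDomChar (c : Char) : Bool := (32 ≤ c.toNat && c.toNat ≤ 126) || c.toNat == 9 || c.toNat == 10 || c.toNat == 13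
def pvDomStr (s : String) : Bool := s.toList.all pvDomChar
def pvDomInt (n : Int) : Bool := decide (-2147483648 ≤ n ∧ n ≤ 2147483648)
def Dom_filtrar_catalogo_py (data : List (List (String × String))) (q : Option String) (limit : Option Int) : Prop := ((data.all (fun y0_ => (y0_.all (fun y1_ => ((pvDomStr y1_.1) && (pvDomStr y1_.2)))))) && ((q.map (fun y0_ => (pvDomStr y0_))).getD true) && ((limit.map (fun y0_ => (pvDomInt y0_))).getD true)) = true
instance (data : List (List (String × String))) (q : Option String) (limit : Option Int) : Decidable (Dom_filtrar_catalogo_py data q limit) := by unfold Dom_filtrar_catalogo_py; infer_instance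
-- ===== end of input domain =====

-- B fuses the filter comprehension + slice of A into one early-terminating budgeted loop; objective: alternative decomposition (same output).

-- shared dict-lookup helper: it.get(k, "") on an association list (first match)
def pvGetS (it : List (String × String)) (k : String) : String :=
  ((it.find? (fun p => p.1 == k)).map (·.2)).getD ""

-- ===== PORT A =====
def filtrar_catalogo_py (data : List (List (String × String))) (q : Option String) (limit : Option Int) : List (List (String × String)) :=
  let items := data
  let items :=
    match q with
    | none => items
    | some qs =>
      if qs = "" then items
      else
        let s := PySem.Str.lower (PySem.Str.strip qs)
        items.filter (fun it =>
          PySem.Str.isIn s (PySem.Str.lower (pvGetS it "clave")) ||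
          PySem.Str.isIn s (PySem.Str.lower (pvGetS it "descripcion")))
  match limit with
  | none => items
  | some n => if 0 < n then PySem.List.slice items none (some n) else items

-- ===== PORT B =====
def pvMatch (s? : Option String) (it : List (String × String)) : Bool :=
  match s? with
  | none => true
  | some s =>
      PySem.Str.isIn s (PySem.Str.lower (pvGetS it "clave")) ||
      PySem.Str.isIn s (PySem.Str.lower (pvGetS it "descripcion"))

-- the early-terminating loop of Source B: 'remaining' budget, break when exhausted
def pvAltGo (s? : Option String) (rem : Option Int) : List (List (String × String)) → List (List (String × String))
  | [] => []
  | it :: rest =>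
    match rem with
    | some r =>
      if r ≤ 0 then []
      else if pvMatch s? it then it :: pvAltGo s? (some (r - 1)) rest
      else pvAltGo s? (some r) rest
    | none =>
      if pvMatch s? it then it :: pvAltGo s? none rest
      else pvAltGo s? none rest

def filtrar_catalogo_py_alt (data : List (List (String × String))) (q : Option String) (limit : Option Int) : List (List (String × String)) :=
  let s? : Option String :=
    match q with
    | none => none
    | some qs => if qs = "" then none else some (PySem.Str.lower (PySem.Str.strip qs))
  let rem : Option Int :=
    match limit with
    | none => none
    | some n => if 0 < n then some n else none
  pvAltGo s? rem data

-- ===== PRECONDITION & SPEC =====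
def Spec_filtrar_catalogo_py (data : List (List (String × String))) (q : Option String) (limit : Option Int) (out : List (List (String × String))) : Prop := out = filtrar_catalogo_py_alt data q limit
instance (data : List (List (String × String))) (q : Option String) (limit : Option Int) (out : List (List (String × String))) : Decidable (Spec_filtrar_catalogo_py data q limit out) := by unfold Spec_filtrar_catalogo_py; infer_instance

-- ===== CLAIM (what is proved, stated in full; the proofs are below) =====
def Claim_equal_filtrar_catalogo_py : Prop := ∀ (data : List (List (String × String))) (q : Option String) (limit : Option Int), Dom_filtrar_catalogo_py data q limit → Spec_filtrar_catalogo_py data q limit (filtrar_catalogo_py data q limit)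

-- ===== LEMMAS AND PROOFS =====

lemma pvAltGo_none (s? : Option String) (l : List (List (String × String))) :
    pvAltGo s? none l = l.filter (pvMatch s?) := by
  induction l with
  | nil => rfl
  | cons it rest ih =>
      by_cases h : pvMatch s? it = true <;> simp [pvAltGo, List.filter, h, ih]

lemma pvAltGo_some (s? : Option String) (l : List (List (String × String))) :
    ∀ r : Int, 0 ≤ r → pvAltGo s? (some r) l = (l.filter (pvMatch s?)).take r.toNat := by
  induction l with
  | nil => intro r _; simp [pvAltGo]
  | cons it rest ih =>
      intro r hr
      by_cases hz : r ≤ 0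
      · have hr0 : r = 0 := le_antisymm hz hr
        subst hr0
        simp [pvAltGo]
      · have hz' : ¬ r ≤ 0 := hz
        have hr1 : (0:Int) ≤ r - 1 := by omega
        have hnat : r.toNat = (r - 1).toNat + 1 := by omega
        by_cases h : pvMatch s? it = true
        · rw [show pvAltGo s? (some r) (it :: rest) = it :: pvAltGo s? (some (r - 1)) rest from by
            simp [pvAltGo, hz', h]]
          rw [ih _ hr1, hnat]
          simp [List.filter, h]
        · rw [show pvAltGo s? (some r) (it :: rest) = pvAltGo s? (some r) rest from by
            simp [pvAltGo, hz', h]]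
          rw [ih _ hr]
          simp [List.filter, h]

lemma pvFilter_true (l : List (List (String × String))) :
    l.filter (pvMatch none) = l := by
  simp [pvMatch]

lemma pvFilterA_eq (s : String) (data : List (List (String × String))) :
    data.filter (fun it =>
      PySem.Str.isIn s (PySem.Str.lower (pvGetS it "clave")) ||
      PySem.Str.isIn s (PySem.Str.lower (pvGetS it "descripcion"))) =
    data.filter (pvMatch (some s)) := rfl

-- ===== VERDICT (by name: the statement is the Claim_ definition above) =====
theorem filtrar_catalogo_py_spec : Claim_equal_filtrar_catalogo_py := by
  intro data q limit _
  unfold Spec_filtrar_catalogo_py filtrar_catalogo_py filtrar_catalogo_py_alt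
  cases q with
  | none =>
      cases limit with
      | none => dsimp only; rw [pvAltGo_none, pvFilter_true]
      | some n =>
          dsimp only
          by_cases hn : 0 < n
          · rw [if_pos hn, if_pos hn, PySem.List.slice_to _ hn.le,
              pvAltGo_some _ _ _ hn.le, pvFilter_true]
          · rw [if_neg hn, if_neg hn, pvAltGo_none, pvFilter_true]
  | some qs =>
      by_cases hq : qs = ""
      · simp only [hq, if_true]
        cases limit with
        | none => dsimp only; rw [pvAltGo_none, pvFilter_true]
        | some n =>
            dsimp only
            by_cases hn : 0 < n
            · rw [if_pos hn, if_pos hn, PySem.List.slice_to _ hn.le,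
                pvAltGo_some _ _ _ hn.le, pvFilter_true]
            · rw [if_neg hn, if_neg hn, pvAltGo_none, pvFilter_true]
      · simp only [if_neg hq]
        rw [pvFilterA_eq]
        cases limit with
        | none => dsimp only; rw [pvAltGo_none]
        | some n =>
            dsimp only
            by_cases hn : 0 < n
            · rw [if_pos hn, if_pos hn, PySem.List.slice_to _ hn.le,
                pvAltGo_some _ _ _ hn.le]
            · rw [if_neg hn, if_neg hn, pvAltGo_none]
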